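-- pv_equiv track=rewrite | github.com/stha-pallavii/python | t.py | next_big
-- ===== SOURCE A (Python) =====
-- def next_big(num):
--     num2=num
--     if(num2<10):
--         return -1
--     while(num2>9):
--         lastd=num2%10
--         num2=num2//10
--         last2d=num2%10
--         if(lastd>last2d):
--             result = (num2//10)*10+lastd
--             return result*10+last2d
-- ===== SOURCE B (Python) =====
-- def next_big(num):
--     if num < 10:
--         return -1
--     digits = []
--     n = num
--     while n > 0:
--         digits.append(n % 10)
--         n //= 10
--     return _scan(digits)
--
--
-- def _scan(ds):
--     if len(ds) < 2:
--         return None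
--     lo, hi = ds[0], ds[1]
--     if lo > hi:
--         higher = 0
--         for d in reversed(ds[2:]):
--             higher = higher * 10 + d
--         return (higher * 10 + lo) * 10 + hi
--     return _scan(ds[1:])
-- ===== Notes on version B (the rewrite author's own statement) =====
-- stated objective: alternative
-- what changed: A's single destructive while-loop (peel last two digits with %10,//10 and early-return) is replaced by a two-phase algorithm: build the digit list once, then a recursive scan over adjacent pairs with a fold that reconstructs the higher-digit prefix.
import Mathlib
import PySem

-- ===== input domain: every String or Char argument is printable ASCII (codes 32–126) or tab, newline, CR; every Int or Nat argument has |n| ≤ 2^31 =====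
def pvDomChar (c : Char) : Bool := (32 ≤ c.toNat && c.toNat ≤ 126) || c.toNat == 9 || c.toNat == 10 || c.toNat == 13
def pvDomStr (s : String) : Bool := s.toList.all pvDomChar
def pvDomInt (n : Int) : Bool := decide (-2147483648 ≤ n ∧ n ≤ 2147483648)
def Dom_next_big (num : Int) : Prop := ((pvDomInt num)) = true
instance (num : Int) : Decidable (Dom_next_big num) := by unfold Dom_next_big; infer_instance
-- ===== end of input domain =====

-- B replaces A's destructive peel-with-early-return loop by a two-phase algorithm
-- (build the digit list once, then a recursive pair scan with a fold reconstruction);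
-- objective: alternative decomposition, same cost.

-- ===== PORT A =====
-- A's while loop: peel last two digits of num2; on lastd > last2d return the swap, else continue.
def nextBigLoopA (num2 : Int) : Option Int :=
  if h : num2 > 9 then
    let lastd := PySem.Int.mod num2 10
    let num2' := PySem.Int.floordiv num2 10
    let last2d := PySem.Int.mod num2' 10
    if lastd > last2d then
      some ((PySem.Int.floordiv num2' 10 * 10 + lastd) * 10 + last2d)
    else
      nextBigLoopA num2'
  else none
termination_by num2.toNat
decreasing_by
  have : PySem.Int.floordiv num2 10 = num2 / 10 :=
    PySem.Int.floordiv_eq_ediv_of_pos (by omega)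
  simp only [this]; omega

def next_big (num : Int) : Option Int :=
  if num < 10 then some (-1) else nextBigLoopA num

-- ===== PORT B =====
-- phase 1 of Source B: the while loop collecting digits least-significant first
def digitsOf (n : Int) : List Int :=
  if _h : n > 0 then
    PySem.Int.mod n 10 :: digitsOf (PySem.Int.floordiv n 10)
  else []
termination_by n.toNat
decreasing_by
  have : PySem.Int.floordiv n 10 = n / 10 :=
    PySem.Int.floordiv_eq_ediv_of_pos (by omega)
  simp only [this]; omega

-- Source B's inner for loop over reversed(ds[2:])
def revVal (ds : List Int) : Int := ds.reverse.foldl (fun acc d => acc * 10 + d) 0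

-- Source B's _scan
def scanB : List Int → Option Int
  | lo :: hi :: rest =>
      if lo > hi then some ((revVal rest * 10 + lo) * 10 + hi)
      else scanB (hi :: rest)
  | _ => none

def next_big_alt (num : Int) : Option Int :=
  if num < 10 then some (-1) else scanB (digitsOf num)

-- ===== PRECONDITION & SPEC =====
def Spec_next_big (num : Int) (out : Option Int) : Prop := out = next_big_alt num
instance (num : Int) (out : Option Int) : Decidable (Spec_next_big num out) := by unfold Spec_next_big; infer_instance

-- ===== CLAIM (what is proved, stated in full; the proofs are below) =====
def Claim_equal_next_big : Prop := ∀ (num : Int), Dom_next_big num → Spec_next_big num (next_big num)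

-- ===== LEMMAS AND PROOFS =====

theorem fd10 (n : Int) : PySem.Int.floordiv n 10 = n / 10 :=
  PySem.Int.floordiv_eq_ediv_of_pos (by omega)

theorem md10 (n : Int) : PySem.Int.mod n 10 = n % 10 :=
  PySem.Int.mod_eq_emod_of_pos (by omega)

theorem revVal_cons (d : Int) (ds : List Int) :
    revVal (d :: ds) = revVal ds * 10 + d := by
  simp [revVal, List.foldl_append]

theorem revVal_digitsOf (n : Int) : revVal (digitsOf n) = if 0 < n then n else 0 := by
  induction n using digitsOf.induct with
  | case1 n h ih =>
    rw [digitsOf, dif_pos h, revVal_cons, ih, fd10 n, md10 n]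
    have := Int.emod_emod_of_dvd n (by norm_num : (10:Int) ∣ 10)
    split_ifs <;> omega
  | case2 n h =>
    rw [digitsOf, dif_neg h]
    simp [revVal]
    omega

theorem loopA_eq_scanB (n : Int) :
    nextBigLoopA n = scanB (digitsOf n) := by
  induction n using nextBigLoopA.induct with
  | case1 n h lastd num2x last2d hcond =>
    simp only [lastd, num2x, last2d] at hcond
    rw [nextBigLoopA, dif_pos h, if_pos hcond]
    rw [digitsOf, dif_pos (by omega : n > 0)]
    rw [digitsOf, dif_pos (show PySem.Int.floordiv n 10 > 0 by rw [fd10]; omega)]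
    rw [scanB, if_pos hcond]
    rw [revVal_digitsOf, fd10, fd10]
    have h100 : 0 ≤ n / 10 / 10 := by positivity
    rcases eq_or_lt_of_le h100 with he | hp
    · rw [if_neg (by omega), ← he]
    · rw [if_pos hp]
  | case2 n h lastd num2x last2d hcond ih =>
    simp only [lastd, num2x, last2d] at hcond ih
    rw [nextBigLoopA, dif_pos h, if_neg hcond]
    rw [digitsOf, dif_pos (by omega : n > 0)]
    rw [digitsOf, dif_pos (show PySem.Int.floordiv n 10 > 0 by rw [fd10]; omega)]
    rw [scanB, if_neg hcond]
    rw [ih]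
    rw [digitsOf, dif_pos (show PySem.Int.floordiv n 10 > 0 by rw [fd10]; omega)]
  | case3 n h =>
    rw [nextBigLoopA, dif_neg h]
    by_cases hp : n > 0
    · rw [digitsOf, dif_pos hp, digitsOf,
        dif_neg (by rw [fd10]; omega)]
      rfl
    · rw [digitsOf, dif_neg hp]
      rfl

-- ===== VERDICT (by name: the statement is the Claim_ definition above) =====
theorem next_big_spec : Claim_equal_next_big := by
  intro num _
  unfold Spec_next_big next_big next_big_alt
  split
  · rfl
  · exact loopA_eq_scanB num
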